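-- pv_equiv track=rewrite | github.com/rhks13/Algorithm | 프로그래머스/lv2/17683. ［3차］ 방금그곡/［3차］ 방금그곡.py | code2list
-- ===== SOURCE A (Python) =====
-- def code2list(code):
--     code_list = [i for i in code]
--     while(1):
--         try:
--             code_list[code_list.index('#')-1]+='#'
--             del code_list[code_list.index('#')]
--         except: break
--     return code_list
-- ===== SOURCE B (Python) =====
-- def code2list(code):
--     notes = []
--     for c in code:
--         if c == '#' and notes:
--             notes[-1] += '#'
--         else:
--             notes.append(c)
--     return notes
-- ===== Notes on version B (the rewrite author's own statement) =====
-- stated objective: simpler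
-- what changed: B replaces A's while-loop of repeated list.index('#') scans plus in-place deletions with a single left-to-right pass over the characters that appends each '#' to the previous note.
-- intended difference: On codes that begin with '#' (other than a run of two or more sharps, where the two coincide), A's list.index('#')-1 is -1 and Python's negative indexing attaches the leading sharp to the LAST note (on '#' alone, to itself, giving ['##']); B starts a new token there (['#'] on '#'), the intended reading of a sharp that follows no note. — e.g. on code2list("#"): A returns ["##"], B returns ["#"]
import Mathlib
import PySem

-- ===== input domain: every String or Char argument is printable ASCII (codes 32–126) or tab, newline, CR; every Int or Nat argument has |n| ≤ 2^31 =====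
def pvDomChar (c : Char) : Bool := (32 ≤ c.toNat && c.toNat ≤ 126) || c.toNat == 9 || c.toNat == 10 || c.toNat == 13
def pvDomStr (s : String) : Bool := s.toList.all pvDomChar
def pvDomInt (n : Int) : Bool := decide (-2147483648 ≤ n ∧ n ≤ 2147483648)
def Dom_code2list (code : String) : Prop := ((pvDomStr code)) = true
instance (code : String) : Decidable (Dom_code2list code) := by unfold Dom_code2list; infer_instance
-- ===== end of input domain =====

-- B replaces A's while-loop of repeated list.index('#') scans plus in-place deletions with a
-- single left-to-right pass over the characters that appends each '#' to the previous note.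

-- ===== PORT A =====
-- the while(1) loop: each successful iteration deletes one element, so fuel = length + 1 always
-- suffices; fuel is only a totality device, the 'none' branches are Python's 'except: break'.
def code2listLoop : Nat → List String → List String
  | 0, l => l
  | fuel+1, l =>
    match PySem.List.index? l "#" with
    | none => l                                   -- code_list.index('#') raises → break
    | some i =>
      -- code_list[code_list.index('#')-1] += '#'  (i-1 may be -1, Python indexing from the end;
      -- l is nonempty here, so the in-range total forms pyGetD/pySetD are exact)
      let j : Int := (i : Int) - 1
      let l' := PySem.List.pySetD l j (PySem.List.pyGetD l j "" ++ "#")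
      match PySem.List.index? l' "#" with
      | none => l'                                -- second .index('#') raises → break
      | some k => code2listLoop fuel (l'.eraseIdx k)   -- del code_list[k]

def code2list (code : String) : List String :=
  let l0 := code.toList.map (fun c => String.ofList [c])   -- [i for i in code]
  code2listLoop (l0.length + 1) l0

-- ===== PORT B =====
def code2list_alt (code : String) : List String :=
  code.toList.foldl (fun notes c =>
    if c = '#' ∧ notes ≠ [] then notes.dropLast ++ [notes.getLast! ++ "#"]   -- notes[-1] += '#'
    else notes ++ [String.ofList [c]]) []                                     -- notes.append(c)

-- ===== PRECONDITION & SPEC =====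
-- On codes that begin with '#' (other than a run of two or more sharps, where the two coincide),
-- A's list.index('#')-1 is -1 and Python's negative indexing attaches the leading sharp to the
-- LAST note (on "#" alone, to itself, giving ["##"]); B starts a new token there (["#"] on "#"),
-- the intended reading of a sharp that follows no note.
def D_code2list (code : String) : Prop :=
  code.toList.head? = some '#' ∧ ¬ (2 ≤ code.toList.length ∧ code.toList.all (· = '#'))
instance (code : String) : Decidable (D_code2list code) := by unfold D_code2list; infer_instance
def Spec_code2list (code : String) (out : List String) : Prop := ¬ D_code2list code → out = code2list_alt code
instance (code : String) (out : List String) : Decidable (Spec_code2list code out) := by unfold Spec_code2list; infer_instance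
def pvDiffWitness_code2list : String := "#"
def pvDiffWitnessOut_code2list : (List String) × (List String) := (["##"], ["#"])

-- ===== CLAIM (what is proved, stated in full; the proofs are below) =====
def Claim_unchanged_code2list : Prop := ∀ (code : String), Dom_code2list code → Spec_code2list code (code2list code)
def Claim_changed_code2list : Prop := Dom_code2list (pvDiffWitness_code2list) ∧ D_code2list (pvDiffWitness_code2list) ∧ code2list (pvDiffWitness_code2list) = pvDiffWitnessOut_code2list.1 ∧ code2list_alt (pvDiffWitness_code2list) = pvDiffWitnessOut_code2list.2 ∧ pvDiffWitnessOut_code2list.1 ≠ pvDiffWitnessOut_code2list.2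

-- ===== LEMMAS AND PROOFS =====

-- small string toolkit (sing c is the one-character token, hashes k is '#' * k)
def sing (c : Char) : String := String.ofList [c]
def hashes (k : Nat) : String := String.ofList (List.replicate k '#')

theorem hash_lit : String.ofList ['#'] = "#" := by decide

theorem sing_ne_empty (c : Char) : sing c ≠ "" := by
  intro he
  have := congrArg String.toList he
  simp [sing] at this

theorem sing_ne_hash (c : Char) (hc : c ≠ '#') : sing c ≠ "#" := by
  intro he
  rw [← hash_lit] at he
  have := congrArg String.toList he
  simp [sing] at this
  exact hc this

theorem concat_hash_ne (a : String) (h : a ≠ "") : a ++ "#" ≠ "#" := by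
  intro he
  have := congrArg String.toList he
  simp at this
  exact h (String.toList_inj.mp (by simp [this]))

theorem hashes_snoc (s : String) (k : Nat) : (s ++ "#") ++ hashes k = s ++ hashes (k+1) := by
  rw [String.append_assoc]
  congr 1
  rw [← hash_lit]
  apply String.toList_inj.mp
  simp [hashes, List.replicate_succ]

theorem hashes_succ (k : Nat) : hashes k ++ "#" = hashes (k+1) := by
  apply String.toList_inj.mp
  simp [hashes, List.replicate_succ']

theorem hashes_ne_hash (n : Nat) (hn : 2 ≤ n) : hashes n ≠ "#" := by
  intro he
  rw [← hash_lit] at he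
  have := congrArg String.toList he
  simp [hashes] at this
  have := congrArg List.length this
  simp at this
  omega

-- the token-level step of B's pass
def mergeTok (acc : List String) (t : String) : List String :=
  if t = "#" ∧ acc ≠ [] then acc.dropLast ++ [acc.getLast! ++ "#"] else acc ++ [t]

theorem mergeTok_ne (acc : List String) (t : String) (h : t ≠ "#") :
    mergeTok acc t = acc ++ [t] := by simp [mergeTok, h]

theorem mergeTok_hash_concat (acc : List String) (a : String) :
    mergeTok (acc ++ [a]) "#" = acc ++ [a ++ "#"] := by simp [mergeTok]

theorem foldl_no_hash (l : List String) (acc : List String) (h : "#" ∉ l) :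
    l.foldl mergeTok acc = acc ++ l := by
  induction l generalizing acc with
  | nil => simp
  | cons t l ih =>
    have ht : t ≠ "#" := fun he => h (by simp [he])
    rw [List.foldl_cons, mergeTok_ne _ _ ht, ih _ (fun he => h (List.mem_cons_of_mem _ he))]
    simp

theorem foldl_step (pre suf : List String) (a : String) (acc : List String)
    (ha : a ≠ "#") (ha' : a ++ "#" ≠ "#") :
    (pre ++ a :: "#" :: suf).foldl mergeTok acc
      = (pre ++ (a ++ "#") :: suf).foldl mergeTok acc := by
  rw [List.foldl_append, List.foldl_append, List.foldl_cons, List.foldl_cons, List.foldl_cons,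
    mergeTok_ne _ a ha, mergeTok_hash_concat, mergeTok_ne _ _ ha']

-- A's loop, once the head token is not "#": every iteration merges the leftmost raw '#' into its
-- (nonempty) predecessor — exactly one step of the mergeTok fold.
theorem loop_eq_foldl (fuel : Nat) (l : List String)
    (hlen : l.length < fuel) (hne : ∀ t ∈ l, t ≠ "") (hhead : l.head? ≠ some "#") :
    code2listLoop fuel l = l.foldl mergeTok [] := by
  induction fuel generalizing l with
  | zero => exact absurd hlen (Nat.not_lt_zero _)
  | succ fuel ih =>
    rw [code2listLoop]
    cases hidx : PySem.List.index? l "#" with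
    | none =>
      have hmem : "#" ∉ l := (PySem.List.index?_eq_none_iff _ _).mp hidx
      simp [foldl_no_hash l [] hmem]
    | some i =>
      obtain ⟨pre, suf, rfl, hplen, hnotin⟩ := (PySem.List.index?_eq_some_iff _ _ _).mp hidx
      have hpre : pre ≠ [] := by rintro rfl; simp at hhead
      obtain ⟨pre', a, rfl⟩ := pre.eq_nil_or_concat.resolve_left hpre
      rw [List.concat_eq_append] at *
      have ha : a ≠ "#" := fun he => hnotin (by simp [he])
      have ha0 : a ≠ "" := hne a (by simp)
      have ha' : a ++ "#" ≠ "#" := concat_hash_ne a ha0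
      subst hplen
      have hj : ((((pre' ++ [a]).length : Int)) - 1) = (pre'.length : Int) := by simp
      have hget : PySem.List.pyGetD ((pre' ++ [a]) ++ "#" :: suf) (pre'.length : Int) "" = a := by
        rw [PySem.List.pyGetD_natCast]
        simp [List.append_assoc, List.getD]
      have hset : PySem.List.pySetD ((pre' ++ [a]) ++ "#" :: suf) (pre'.length : Int) (a ++ "#")
          = pre' ++ (a ++ "#") :: "#" :: suf := by
        rw [PySem.List.pySetD_natCast]
        simp [List.append_assoc]
      simp only [hj, hget, hset]
      have hidx2 : PySem.List.index? (pre' ++ (a ++ "#") :: "#" :: suf) "#"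
          = some (pre'.length + 1) := by
        rw [PySem.List.index?_eq_some_iff]
        refine ⟨pre' ++ [a ++ "#"], suf, by simp, by simp, ?_⟩
        intro hmem
        rcases List.mem_append.mp hmem with h1 | h1
        · exact hnotin (List.mem_append.mpr (Or.inl h1))
        · exact ha' (List.mem_singleton.mp h1).symm
      rw [hidx2]
      show code2listLoop fuel ((pre' ++ (a ++ "#") :: "#" :: suf).eraseIdx (pre'.length + 1))
          = List.foldl mergeTok [] (pre' ++ [a] ++ "#" :: suf)
      have herase : (pre' ++ (a ++ "#") :: "#" :: suf).eraseIdx (pre'.length + 1)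
          = pre' ++ (a ++ "#") :: suf := by
        have heq : pre' ++ (a ++ "#") :: "#" :: suf = (pre' ++ [a ++ "#"]) ++ "#" :: suf := by simp
        rw [heq]
        have hl : (pre' ++ [a ++ "#"]).length = pre'.length + 1 := by simp
        rw [← hl]
        simp [List.eraseIdx_append_of_length_le]
      rw [herase]
      have hrec := ih (pre' ++ (a ++ "#") :: suf)
        (by simp at hlen ⊢; omega)
        (by intro t ht
            rcases List.mem_append.mp ht with h1 | h1
            · exact hne t (by simp [h1])
            · rcases List.mem_cons.mp h1 with rfl | h2
              · intro he; exact ha0 (by simpa using congrArg String.toList he)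
              · exact hne t (by simp [h2]))
        (by cases pre' with
            | nil => simpa using ha'
            | cons x xs =>
              simp only [List.cons_append, List.head?_cons] at hhead ⊢
              exact hhead)
      rw [hrec, ← foldl_step pre' suf a [] ha ha']
      simp

theorem set_last_eq (t : List String) (h : t ≠ []) (v : String) :
    t.set (t.length - 1) v = t.dropLast ++ [v] := by
  induction t with
  | nil => simp at h
  | cons x xs ih =>
    cases xs with
    | nil => simp
    | cons y ys =>
      have := ih (by simp)
      simp only [List.length_cons, Nat.add_sub_cancel] at this ⊢
      rw [List.set_cons_succ, this]
      simp [List.dropLast_cons_of_ne_nil]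

theorem pySetD_neg_one' (l : List String) (v : String) (h : l ≠ []) :
    PySem.List.pySetD l (-1) v = l.dropLast ++ [v] := by
  have hl : (0:Int) < l.length := by
    cases l with | nil => simp at h | cons x xs => simp
  unfold PySem.List.pySetD PySem.List.pySet? PySem.List.pyIdx?
  rw [if_neg (by omega), if_pos (by omega)]
  simpa using set_last_eq l h v

-- A's loop on a leading "#" token: it is appended to the LAST element (Python's l[-1])
theorem loop_hash_step (fuel : Nat) (t : List String) (h : t ≠ []) :
    code2listLoop (fuel+1) ("#" :: t) = code2listLoop fuel (t.dropLast ++ [t.getLast h ++ "#"]) := by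
  rw [code2listLoop]
  rw [PySem.List.index?_cons_self]
  have h0 : ("#" :: t) ≠ ([] : List String) := by simp
  have hj : ((0:Nat) : Int) - 1 = (-1 : Int) := by norm_num
  simp only [hj]
  rw [PySem.List.pyGetD_neg_one _ _ h0, pySetD_neg_one' _ _ h0]
  have hlast : ("#" :: t).getLast h0 = t.getLast h := List.getLast_cons h
  have hdrop : ("#" :: t).dropLast = "#" :: t.dropLast := List.dropLast_cons_of_ne_nil h
  rw [hlast, hdrop]
  rw [List.cons_append, PySem.List.index?_cons_self]
  rfl

-- k leading "#" tokens are folded onto the last element, one by one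
theorem loop_phase1 (k : Nat) (rest : List String) (fuel : Nat) (h : rest ≠ [])
    (hf : k < fuel) :
    code2listLoop fuel (List.replicate k "#" ++ rest)
      = code2listLoop (fuel - k) (rest.dropLast ++ [rest.getLast h ++ hashes k]) := by
  induction k generalizing rest fuel with
  | zero =>
    have h0 : hashes 0 = "" := rfl
    simp [h0, List.dropLast_concat_getLast h]
  | succ k ih =>
    obtain ⟨f, rfl⟩ : ∃ f, fuel = f + 1 := ⟨fuel - 1, by omega⟩
    have ht : List.replicate k "#" ++ rest ≠ ([] : List String) := by simp [h]
    rw [List.replicate_succ, List.cons_append, loop_hash_step f _ ht]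
    have hlast : (List.replicate k "#" ++ rest).getLast ht = rest.getLast h :=
      List.getLast_append_right h
    have hdrop : (List.replicate k "#" ++ rest).dropLast
        = List.replicate k "#" ++ rest.dropLast := by
      simp [List.dropLast_append_of_ne_nil, h]
    rw [hlast, hdrop, List.append_assoc]
    have h2 : rest.dropLast ++ [rest.getLast h ++ "#"] ≠ ([] : List String) := by simp
    rw [ih _ f h2 (by omega)]
    have hl2 : (rest.dropLast ++ [rest.getLast h ++ "#"]).getLast h2 = rest.getLast h ++ "#" := by
      simp
    have hd2 : (rest.dropLast ++ [rest.getLast h ++ "#"]).dropLast = rest.dropLast := by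
      simp
    rw [hl2, hd2, hashes_snoc]
    congr 1
    omega

-- B's char step is the token step on a one-character token
theorem bstep_eq (acc : List String) (c : Char) :
    (if c = '#' ∧ acc ≠ [] then acc.dropLast ++ [acc.getLast! ++ "#"]
     else acc ++ [String.ofList [c]]) = mergeTok acc (sing c) := by
  by_cases hc : c = '#'
  · subst hc
    by_cases hacc : acc = []
    · simp [hacc, mergeTok, sing, hash_lit]
    · simp [hacc, mergeTok, sing, hash_lit]
  · rw [if_neg (by simp [hc]), mergeTok_ne _ _ (sing_ne_hash c hc)]
    rfl

-- B's pass over a run of k ≥ 1 sharps produces the single token '#' * k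
theorem bfold_replicate (k : Nat) :
    (List.replicate (k+1) '#').foldl (fun acc c => mergeTok acc (sing c)) [] = [hashes (k+1)] := by
  induction k with
  | zero => simp [mergeTok, sing, hash_lit, hashes]
  | succ k ih =>
    rw [List.replicate_succ', List.foldl_append, ih]
    simp only [List.foldl_cons, List.foldl_nil]
    rw [show sing '#' = "#" from hash_lit]
    simp [mergeTok, hashes_succ]

theorem foldl_bstep (cs : List Char) :
    cs.foldl (fun notes c =>
      if c = '#' ∧ notes ≠ [] then notes.dropLast ++ [notes.getLast! ++ "#"]
      else notes ++ [String.ofList [c]]) []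
    = cs.foldl (fun acc c => mergeTok acc (sing c)) [] := by
  suffices h : ∀ acc : List String, cs.foldl (fun notes c =>
      if c = '#' ∧ notes ≠ [] then notes.dropLast ++ [notes.getLast! ++ "#"]
      else notes ++ [String.ofList [c]]) acc
      = cs.foldl (fun acc c => mergeTok acc (sing c)) acc from h []
  induction cs with
  | nil => intro acc; rfl
  | cons c t ih =>
    intro acc
    rw [List.foldl_cons, List.foldl_cons, bstep_eq acc c, ih]

-- ===== VERDICT (by name: the statement is the Claim_ definition above) =====
theorem code2list_spec : Claim_unchanged_code2list := by
  intro code _ hnd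
  unfold code2list code2list_alt
  set cs := code.toList with hcs
  rw [foldl_bstep]
  by_cases hhead : cs.head? = some '#'
  · -- ¬ D_ forces cs = '#' * k with k ≥ 2, where the two coincide on ['#' * k]
    unfold D_code2list at hnd
    rw [← hcs] at hnd
    push Not at hnd
    obtain ⟨hk2, hall⟩ := hnd hhead
    have hall' : ∀ c ∈ cs, c = '#' := by simpa [List.all_eq_true] using hall
    have hrep : cs = List.replicate cs.length '#' := List.eq_replicate_of_mem hall'
    set k := cs.length with hklen
    obtain ⟨m, hm⟩ : ∃ m, k = m + 1 := ⟨k - 1, by omega⟩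
    -- B's side
    conv_rhs => rw [hrep, hm, bfold_replicate m, ← hm]
    -- A's side
    have hmapsing : (List.replicate k '#').map (fun c => String.ofList [c])
        = List.replicate k ("#" : String) := by
      simp [List.map_replicate, hash_lit]
    conv_lhs => rw [hrep, hmapsing]
    have hrepsplit : List.replicate k ("#" : String)
        = List.replicate (k-1) "#" ++ ["#"] := by
      rw [← List.replicate_succ']
      congr 1
      omega
    simp only [List.length_replicate]
    rw [hrepsplit, loop_phase1 (k-1) ["#"] (k+1) (by simp) (by omega)]
    have hdl : (["#"] : List String).dropLast = [] := rfl
    rw [hdl, List.getLast_singleton, List.nil_append]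
    have hone : ("#" : String) ++ hashes (k-1) = hashes k := by
      have hsn := hashes_snoc "" (k-1)
      have hk1 : k - 1 + 1 = k := by omega
      rw [hk1] at hsn
      simpa using hsn
    rw [hone]
    have hnomem : ("#" : String) ∉ [hashes k] := by
      simp
      exact fun he => hashes_ne_hash k hk2 he.symm
    obtain ⟨f, hf⟩ : ∃ f, k + 1 - (k - 1) = f + 1 := ⟨k - (k-1), by omega⟩
    rw [hf, code2listLoop, (PySem.List.index?_eq_none_iff _ _).mpr hnomem]
  · -- no leading sharp: A's loop is the mergeTok fold over the one-character tokens
    have hA : code2listLoop ((cs.map (fun c => String.ofList [c])).length + 1)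
        (cs.map (fun c => String.ofList [c]))
        = (cs.map (fun c => String.ofList [c])).foldl mergeTok [] := by
      apply loop_eq_foldl
      · simp
      · intro t ht
        obtain ⟨d, _, rfl⟩ := List.mem_map.mp ht
        exact sing_ne_empty d
      · cases hcase : cs with
        | nil => simp
        | cons c t =>
          have hc : c ≠ '#' := by
            intro he; apply hhead; rw [hcase, he]; rfl
          simp only [List.map_cons, List.head?_cons]
          intro he
          exact sing_ne_hash c hc (Option.some.inj he)
    rw [hA, List.foldl_map]
    rfl

theorem code2list_changed : Claim_changed_code2list := by unfold Claim_changed_code2list; decide
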